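-- pv_equiv track=rewrite | github.com/olma2077/advent-of-code | 2015/15/part_2.py | gen_recepies
-- ===== SOURCE A (Python) =====
-- def gen_recepies(ingridients, left, recepie=None):
--     # classic recursive combination with dict quirks
--     if not recepie:
--         # recepie starting state, each ingridient should be preset 1 spoon min
--         recepie = {ingridient: 1 for ingridient in ingridients}
--     else:
--         # copy dict as it will be updated
--         recepie = recepie.copy()
--
--     # lazy way to prune invalid combinations
--     if sum(recepie.values()) > 100:
--         return []
--
--     # if only 1 ingridient left to add, just fill up to 100 spoons
--     if len(left) == 1:
--         recepie[left[0]] = 100 - sum(recepie.values()) + 1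
--         return [recepie]
--
--     recepies = []
--     # try all possible combinations of ingridients amounts
--     for i in range(1, 100):
--         recepie[left[0]] = i
--         recepies += gen_recepies(ingridients, left[1:], recepie)
--
--     return recepies
-- ===== SOURCE B (Python) =====
-- def gen_recepies(ingridients, left, recepie=None):
--     # Iterative breadth-first build: a frontier of (overlay of assigned amounts, running total)
--     # pairs is expanded key by key, keeping amounts that leave the total <= 100; full recipes
--     # are only materialised in the last pass (base merged with the overlay, last key = remainder).
--     base = dict(recepie) if recepie else {ingridient: 1 for ingridient in ingridients}
--     total = sum(base.values())
--     if total > 100: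
--         return []
--     keys, last = left[:-1], left[-1]
--     if not keys:
--         return [{**base, last: 101 - total}]
--     frontier = [({}, total)]
--     for key in keys[:-1]:
--         new_frontier = []
--         for ov, t in frontier:
--             rem = t - (ov[key] if key in ov else base.get(key, 0))
--             for i in range(1, 100):
--                 if rem + i <= 100:
--                     new_frontier.append(({**ov, key: i}, rem + i))
--         frontier = new_frontier
--     key = keys[-1]
--     out = []
--     for ov, t in frontier:
--         rem = t - (ov[key] if key in ov else base.get(key, 0))
--         for i in range(1, 100):
--             if rem + i <= 100:
--                 out.append({**base, **ov, key: i, last: 101 - (rem + i)})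
--     return out
-- ===== Notes on version B (the rewrite author's own statement) =====
-- stated objective: alternative
-- what changed: B replaces A's depth-first recursion (99 branches per level, recursing into over-100 branches only to prune them by re-summing the whole dict, copying the full recipe dict at every node) with an iterative breadth-first build: an explicit frontier of (small overlay of assigned amounts, running total) pairs is expanded one key per pass keeping only amounts with total <= 100, and full recipe dicts are materialised only in the last pass.
import Mathlib
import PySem

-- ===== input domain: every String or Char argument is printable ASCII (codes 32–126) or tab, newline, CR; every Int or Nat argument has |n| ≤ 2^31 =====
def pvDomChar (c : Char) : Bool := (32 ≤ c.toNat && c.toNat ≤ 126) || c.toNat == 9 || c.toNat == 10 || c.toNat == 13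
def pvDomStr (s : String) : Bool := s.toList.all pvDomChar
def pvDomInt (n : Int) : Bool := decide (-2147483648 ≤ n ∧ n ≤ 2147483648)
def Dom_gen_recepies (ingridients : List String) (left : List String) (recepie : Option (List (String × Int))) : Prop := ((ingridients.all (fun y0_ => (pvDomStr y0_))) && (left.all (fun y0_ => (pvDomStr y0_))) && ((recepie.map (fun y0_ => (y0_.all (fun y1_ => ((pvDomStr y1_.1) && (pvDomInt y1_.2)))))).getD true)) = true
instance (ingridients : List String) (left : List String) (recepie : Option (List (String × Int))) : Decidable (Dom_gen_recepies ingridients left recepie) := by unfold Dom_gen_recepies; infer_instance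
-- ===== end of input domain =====

-- B replaces A's depth-first recursion by an iterative breadth-first frontier of
-- (small overlay of assigned amounts, running total) pairs, expanded one key per pass keeping
-- only amounts with total ≤ 100; full recipes are only materialised in the last pass.

-- ===== PORT A =====
-- the dict A starts from — `{ingridient: 1 for ingridient in ingridients}` when `recepie` is
-- falsy (None or the empty dict), else the passed dict (Python's `.copy()` is a no-op for an
-- immutable port)
def pvEff (ingridients : List String) (recepie : Option (List (String × Int))) : PySem.Dict String Int :=
  match recepie with
  | none => ingridients.foldl (fun d ing => d.insert ing 1) PySem.Dict.empty
  | some l =>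
      if l.isEmpty then ingridients.foldl (fun d ing => d.insert ing 1) PySem.Dict.empty
      else PySem.Dict.ofList l

mutual
-- literal transliteration of A: init/copy, prune on sum > 100, fill the last ingredient,
-- else loop i = 1..99 and recurse
def gen_recepies (ingridients : List String) (left : List String) (recepie : Option (List (String × Int))) : List (List (String × Int)) :=
  pvGenBody ingridients left (pvEff ingridients recepie)
termination_by (left.length, 1)

def pvGenBody (ingridients : List String) (left : List String) (r : PySem.Dict String Int) : List (List (String × Int)) :=
  if r.values.sum > 100 then []
  else
    match left with
    | [k] => [(r.insert k (100 - r.values.sum + 1)).items]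
    | [] => []  -- Python raises IndexError at `left[0]` here; excluded by Pre_
    | k :: rest =>
        (PySem.List.pyRange 1 100 1).foldl
          (fun acc i => acc ++ gen_recepies ingridients rest (some ((r.insert k i).items))) []
termination_by (left.length, 0)
end

-- ===== PORT B =====
-- Source B's own init lines (textually the same as A's first lines)
def pvEffB (ingridients : List String) (recepie : Option (List (String × Int))) : PySem.Dict String Int :=
  match recepie with
  | none => ingridients.foldl (fun d ing => d.insert ing 1) PySem.Dict.empty
  | some l =>
      if l.isEmpty then ingridients.foldl (fun d ing => d.insert ing 1) PySem.Dict.empty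
      else PySem.Dict.ofList l

-- Source B's overlay lookup `ov[key] if key in ov else base.get(key, 0)`
def pvLook (base ov : PySem.Dict String Int) (key : String) : Int :=
  if ov.contains key then ov.getD key 0 else base.getD key 0

-- one pass of Source B's frontier loop: expand every (overlay, total) of the frontier by key = 1..99,
-- appending only the amounts that keep the total ≤ 100
def pvStepO (base : PySem.Dict String Int) (key : String)
    (fr : List (PySem.Dict String Int × Int)) : List (PySem.Dict String Int × Int) :=
  fr.foldl (fun acc dt =>
    let rem := dt.2 - pvLook base dt.1 key
    (PySem.List.pyRange 1 100 1).foldl (fun acc2 i =>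
      if rem + i ≤ 100 then acc2 ++ [(dt.1.insert key i, rem + i)] else acc2) acc) []

-- literal transliteration of Source B: init, prune, split left into keys/last; a single key is
-- filled directly; otherwise run the frontier passes over keys[:-1] and fuse the last key's
-- expansion with building the output dicts ({**base, **ov, key: i, last: 101 - (rem + i)})
def gen_recepies_alt (ingridients : List String) (left : List String) (recepie : Option (List (String × Int))) : List (List (String × Int)) :=
  let base := pvEffB ingridients recepie
  let total := base.values.sum
  if total > 100 then []
  else
    match left.getLast? with
    | none => []  -- Python raises IndexError at `left[-1]`; excluded by Pre_
    | some last =>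
        match left.dropLast.getLast? with
        | none => [(base.insert last (101 - total)).items]
        | some key =>
            let frontier := left.dropLast.dropLast.foldl
              (fun fr k => pvStepO base k fr) [(PySem.Dict.empty, total)]
            frontier.foldl (fun out dt =>
              let rem := dt.2 - pvLook base dt.1 key
              (PySem.List.pyRange 1 100 1).foldl (fun out2 i =>
                if rem + i ≤ 100 then
                  out2 ++ [(((PySem.Dict.update base dt.1.items).insert key i).insert last
                            (101 - (rem + i))).items]
                else out2) out) []

-- ===== PRECONDITION & SPEC =====
-- Pre_ excludes exactly the inputs where the Python A raises IndexError: `left == []` reached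
-- with the starting dict's value sum ≤ 100 (with sum > 100 A returns [] before touching left).
def Pre_gen_recepies (ingridients : List String) (left : List String) (recepie : Option (List (String × Int))) : Prop :=
  left ≠ [] ∨ (pvEff ingridients recepie).values.sum > 100
instance (ingridients : List String) (left : List String) (recepie : Option (List (String × Int))) : Decidable (Pre_gen_recepies ingridients left recepie) := by unfold Pre_gen_recepies; infer_instance
def pvWitness_gen_recepies : List String × List String × (Option (List (String × Int))) :=
  (["a", "b"], ["a", "b"], none)

def Spec_gen_recepies (ingridients : List String) (left : List String) (recepie : Option (List (String × Int))) (out : List (List (String × Int))) : Prop := out = gen_recepies_alt ingridients left recepie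
instance (ingridients : List String) (left : List String) (recepie : Option (List (String × Int))) (out : List (List (String × Int))) : Decidable (Spec_gen_recepies ingridients left recepie out) := by unfold Spec_gen_recepies; infer_instance

-- ===== CLAIM (what is proved, stated in full; the proofs are below) =====
def Claim_equal_gen_recepies : Prop := ∀ (ingridients : List String) (left : List String) (recepie : Option (List (String × Int))), Dom_gen_recepies ingridients left recepie → Pre_gen_recepies ingridients left recepie → Spec_gen_recepies ingridients left recepie (gen_recepies ingridients left recepie)

-- ===== LEMMAS AND PROOFS =====

-- abbreviations used only by the proofs
def pvReal (base : PySem.Dict String Int) (dt : PySem.Dict String Int × Int) :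
    PySem.Dict String Int × Int := (PySem.Dict.update base dt.1.items, dt.2)

def pvFin (last : String) (dt : PySem.Dict String Int × Int) : List (String × Int) :=
  (dt.1.insert last (101 - dt.2)).items

-- one overlay-frontier expansion, as a flatMap
def pvStepFMO (base : PySem.Dict String Int) (key : String) (dt : PySem.Dict String Int × Int) :
    List (PySem.Dict String Int × Int) :=
  (PySem.List.pyRange 1 100 1).flatMap (fun i =>
    if dt.2 - pvLook base dt.1 key + i ≤ 100 then
      [(dt.1.insert key i, dt.2 - pvLook base dt.1 key + i)] else [])

-- the same expansion on full recipe dicts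
def pvStepFM (key : String) (dt : PySem.Dict String Int × Int) :
    List (PySem.Dict String Int × Int) :=
  (PySem.List.pyRange 1 100 1).flatMap (fun i =>
    if dt.2 - dt.1.getD key 0 + i ≤ 100 then
      [(dt.1.insert key i, dt.2 - dt.1.getD key 0 + i)] else [])

-- depth-first reading of the frontier passes on full dicts
def pvDfs (last : String) : List String → PySem.Dict String Int × Int → List (List (String × Int))
  | [], dt => [(dt.1.insert last (101 - dt.2)).items]
  | k :: ks, dt =>
      (PySem.List.pyRange 1 100 1).flatMap (fun i =>
        if dt.2 - dt.1.getD k 0 + i ≤ 100 then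
          pvDfs last ks (dt.1.insert k i, dt.2 - dt.1.getD k 0 + i) else [])

-- `dict(pairs)` round-trips: rebuilding a nodup-keys dict from its items gives it back
theorem pv_ofList_items (d : PySem.Dict String Int) (h : d.keys.Nodup) :
    PySem.Dict.ofList d.items = d := by
  apply PySem.Dict.ext
  have := PySem.Dict.items_foldl_insert_fresh d.items (fun p => p.1) (fun p => p.2)
      PySem.Dict.empty (fun a _ => PySem.Dict.contains_empty a.1) (by simpa [PySem.Dict.keys] using h)
  simpa [PySem.Dict.ofList, PySem.Dict.update] using this

-- nonempty dicts stay nonempty under insert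
theorem pv_items_insert_ne_nil (d : PySem.Dict String Int) (k : String) (v : Int) :
    (d.insert k v).items ≠ [] := by
  rw [PySem.Dict.items_insert]
  split_ifs with hc
  · intro hnil
    simp only [List.map_eq_nil_iff] at hnil
    simp [PySem.Dict.contains_eq_isSome_get?, PySem.Dict.get?, hnil] at hc
  · simp

-- sum of values after an overwrite-or-append insert
theorem pv_sum_replace_aux (k : String) (v : Int) :
    ∀ (l : List (String × Int)) (w : Int), (l.map (·.1)).Nodup → (k, w) ∈ l →
      ((l.map (fun p => if p.1 == k then (k, v) else p)).map (·.2)).sum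
        = (l.map (·.2)).sum - w + v := by
  intro l
  induction l with
  | nil => intro w _ hm; cases hm
  | cons p t ih =>
      intro w hnd hm
      simp only [List.map_cons, List.nodup_cons] at hnd
      rcases List.mem_cons.mp hm with hp | ht
      · subst hp
        have htid : t.map (fun p => if p.1 == k then (k, v) else p) = t.map id := by
          apply List.map_congr_left
          intro q hq
          have hqk : q.1 ≠ k := by
            intro hqk
            exact hnd.1 (by simpa [← hqk] using List.mem_map_of_mem (f := (·.1)) hq)
          simp [hqk]
        simp only [List.map_cons, List.sum_cons, beq_self_eq_true, if_true, htid, List.map_id]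
        omega
      · have hpk : p.1 ≠ k := fun hpk =>
          hnd.1 (hpk ▸ (by simpa using List.mem_map_of_mem (f := (·.1)) ht))
        have hrec := ih w hnd.2 ht
        simp only [List.map_cons, List.sum_cons, if_neg (by simp [hpk] :
          ¬ ((p.1 == k) = true)), hrec]
        omega

theorem pv_sum_values_insert (d : PySem.Dict String Int) (k : String) (v : Int)
    (h : d.keys.Nodup) :
    (d.insert k v).values.sum = d.values.sum - d.getD k 0 + v := by
  cases hc : d.contains k with
  | false =>
      simp only [PySem.Dict.values, PySem.Dict.items_insert_of_not_contains d v hc,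
        PySem.Dict.getD_of_not_contains d 0 hc]
      simp
  | true =>
      have hsome : (d.get? k).isSome := by rw [← PySem.Dict.contains_eq_isSome_get?, hc]
      obtain ⟨w, hw⟩ := Option.isSome_iff_exists.mp hsome
      have hmem : (k, w) ∈ d.items := (PySem.Dict.get?_eq_some_iff_mem_items d k w h).mp hw
      have hgd : d.getD k 0 = w := PySem.Dict.getD_of_get?_eq_some d 0 hw
      have hit := PySem.Dict.items_insert d k v
      rw [hc, if_pos rfl] at hit
      simp only [PySem.Dict.values, hit, hgd]
      exact pv_sum_replace_aux k v d.items w (by simpa [PySem.Dict.keys] using h) hmem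

theorem pv_nodup_keys_eff (ingridients : List String) (recepie : Option (List (String × Int))) :
    (pvEff ingridients recepie).keys.Nodup := by
  unfold pvEff
  match recepie with
  | none => exact PySem.Dict.nodup_keys_foldl_insert ingridients (fun _ _ => 1) _ PySem.Dict.nodup_keys_empty
  | some l =>
      dsimp only
      split_ifs
      · exact PySem.Dict.nodup_keys_foldl_insert ingridients (fun _ _ => 1) _ PySem.Dict.nodup_keys_empty
      · exact PySem.Dict.nodup_keys_ofList l

-- A = DFS: for a nodup-keys dict whose value sum is ≤ 100, A's recursion over keys ++ [last]
-- computes the depth-first expansion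
theorem pv_body_eq_dfs (ingridients : List String) (last : String) (keys : List String)
    (r : PySem.Dict String Int) (hnd : r.keys.Nodup) (hle : r.values.sum ≤ 100) :
    pvGenBody ingridients (keys ++ [last]) r = pvDfs last keys (r, r.values.sum) := by
  induction keys generalizing r with
  | nil =>
      unfold pvGenBody pvDfs
      rw [if_neg (by omega)]
      have h1 : (100 : Int) - r.values.sum + 1 = 101 - r.values.sum := by ring
      rw [h1]
      simp only [List.nil_append]
  | cons k ks ih =>
      have hkey : ∀ i : Int,
          gen_recepies ingridients (ks ++ [last]) (some ((r.insert k i).items))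
            = pvGenBody ingridients (ks ++ [last]) (r.insert k i) := by
        intro i
        unfold gen_recepies
        congr 1
        unfold pvEff
        dsimp only
        rw [if_neg (by simp [List.isEmpty_iff, pv_items_insert_ne_nil r k i])]
        exact pv_ofList_items _ (PySem.Dict.nodup_keys_insert r k i hnd)
      have hsum : ∀ i : Int,
          (r.insert k i).values.sum = r.values.sum - r.getD k 0 + i :=
        fun i => pv_sum_values_insert r k i hnd
      have hbody : pvGenBody ingridients ((k :: ks) ++ [last]) r
          = (PySem.List.pyRange 1 100 1).foldl
              (fun acc i => acc ++ gen_recepies ingridients (ks ++ [last]) (some ((r.insert k i).items))) [] := by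
        rw [List.cons_append]
        unfold pvGenBody
        rw [if_neg (by omega)]
        cases ks <;> rfl
      rw [hbody, PySem.List.foldl_append_eq_flatMap, List.nil_append]
      show _ = pvDfs last (k :: ks) (r, r.values.sum)
      unfold pvDfs
      apply List.flatMap_congr
      intro i _
      rw [hkey i]
      dsimp only
      by_cases hc : r.values.sum - r.getD k 0 + i ≤ 100
      · rw [if_pos hc]
        have := ih (r.insert k i) (PySem.Dict.nodup_keys_insert r k i hnd) (by rw [hsum i]; omega)
        rw [this, hsum i]
      · rw [if_neg hc]
        unfold pvGenBody
        rw [if_pos (by rw [hsum i]; omega)]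

-- a guarded-append foldl is a flatMap of guarded singletons
theorem pv_foldl_opt {β : Type} (l : List Int) (p : Int → Prop) [DecidablePred p] (f : Int → β)
    (acc : List β) :
    l.foldl (fun a i => if p i then a ++ [f i] else a) acc
      = acc ++ l.flatMap (fun i => if p i then [f i] else []) := by
  induction l generalizing acc with
  | nil => simp
  | cons x t ih =>
      simp only [List.foldl_cons, List.flatMap_cons]
      split_ifs with hx
      · rw [ih]; simp
      · rw [ih]; simp

theorem pv_stepO_eq (base : PySem.Dict String Int) (key : String)
    (fr : List (PySem.Dict String Int × Int)) :
    pvStepO base key fr = fr.flatMap (pvStepFMO base key) := by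
  unfold pvStepO
  have hfun : (fun (acc : List (PySem.Dict String Int × Int)) dt =>
      let rem := dt.2 - pvLook base dt.1 key
      (PySem.List.pyRange 1 100 1).foldl (fun acc2 i =>
        if rem + i ≤ 100 then acc2 ++ [(dt.1.insert key i, rem + i)] else acc2) acc)
      = (fun acc dt => acc ++ pvStepFMO base key dt) := by
    funext acc dt
    exact pv_foldl_opt (PySem.List.pyRange 1 100 1)
      (fun i => dt.2 - pvLook base dt.1 key + i ≤ 100)
      (fun i => (dt.1.insert key i, dt.2 - pvLook base dt.1 key + i)) acc
  rw [hfun, PySem.List.foldl_append_eq_flatMap, List.nil_append]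

-- get? reads the items list: first (here: only) match
theorem pv_get?_mk_find (x : String) (l : List (String × Int)) :
    (PySem.Dict.mk l).get? x = (l.find? (fun p => p.1 == x)).map (·.2) := by
  induction l with
  | nil => rfl
  | cons p t ih =>
      rw [show (p :: t) = ((p.1, p.2) :: t) from rfl, PySem.Dict.get?_mk_cons]
      rw [List.find?_cons]
      by_cases h : (p.1 == x) = true
      · simp [h]
      · simp [h, ih]

theorem pv_get?_items (d : PySem.Dict String Int) (x : String) :
    d.get? x = (d.items.find? (fun p => p.1 == x)).map (·.2) :=
  pv_get?_mk_find x d.items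

-- lookup through `d.update(pairs)`: last (here: only) write wins, else the base value
theorem pv_get?_update (x : String) :
    ∀ (l : List (String × Int)) (b : PySem.Dict String Int), (l.map (·.1)).Nodup →
      (PySem.Dict.update b l).get? x
        = ((l.find? (fun p => p.1 == x)).map (·.2)).or (b.get? x) := by
  intro l
  induction l with
  | nil => intro b _; simp [PySem.Dict.update]
  | cons p t ih =>
      intro b hnd
      simp only [List.map_cons, List.nodup_cons] at hnd
      have hcons : PySem.Dict.update b (p :: t) = PySem.Dict.update (b.insert p.1 p.2) t := rfl
      rw [hcons, ih _ hnd.2]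
      by_cases h : (p.1 == x) = true
      · have hx : x = p.1 := (eq_of_beq h).symm
        have hfind : t.find? (fun p => p.1 == x) = none := by
          rw [List.find?_eq_none]
          intro q hq hbq
          have hq1 : q.1 ∈ t.map (fun x => x.1) := List.mem_map_of_mem hq
          rw [eq_of_beq hbq, hx] at hq1
          exact hnd.1 hq1
        simp only [List.find?_cons, h, hfind]
        simp only [Option.map_none, Option.none_or]
        subst hx
        simp [PySem.Dict.get?_insert_self]
      · have hfalse : (p.1 == x) = false := by simpa using h
        simp only [List.find?_cons, hfalse]
        have hne : x ≠ p.1 := fun hx => h (by simp [hx])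
        rw [PySem.Dict.get?_insert_of_ne _ _ hne]

-- Source B's overlay lookup equals the lookup in the realized full dict
theorem pv_look_eq (base ov : PySem.Dict String Int) (key : String) (hnd : ov.keys.Nodup) :
    pvLook base ov key = (PySem.Dict.update base ov.items).getD key 0 := by
  unfold pvLook
  have hupd : (PySem.Dict.update base ov.items).get? key
      = (ov.get? key).or (base.get? key) := by
    rw [pv_get?_update key ov.items base (by simpa [PySem.Dict.keys] using hnd), ← pv_get?_items]
  rw [PySem.Dict.contains_eq_isSome_get?]
  cases h : ov.get? key with
  | none => simp [h, PySem.Dict.getD_eq_get?_getD, hupd]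
  | some w => simp [h, PySem.Dict.getD_eq_get?_getD, hupd]

-- two inserts at different keys commute when the first key is already present
theorem pv_insert_comm (d : PySem.Dict String Int) (k k' : String) (v v' : Int)
    (hne : k' ≠ k) (hc : d.contains k = true) :
    (d.insert k v).insert k' v' = (d.insert k' v').insert k v := by
  apply PySem.Dict.ext
  have hbne : (k' == k) = false := beq_eq_false_iff_ne.mpr hne
  have hbne2 : (k == k') = false := beq_eq_false_iff_ne.mpr (Ne.symm hne)
  have hck' : (d.insert k v).contains k' = d.contains k' := by
    rw [PySem.Dict.contains_insert, hbne]; rfl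
  have hck : (d.insert k' v').contains k = true := by
    rw [PySem.Dict.contains_insert, hc]; simp
  cases hq : d.contains k' with
  | true =>
      rw [PySem.Dict.items_insert_of_contains _ v' (by rw [hck']; exact hq),
          PySem.Dict.items_insert_of_contains _ v hc,
          PySem.Dict.items_insert_of_contains _ v hck,
          PySem.Dict.items_insert_of_contains _ v' hq]
      rw [List.map_map, List.map_map]
      apply List.map_congr_left
      intro p _
      simp only [Function.comp_apply]
      by_cases h1 : (p.1 == k) = true
      · have h1' : (p.1 == k') = false := by
          rw [beq_eq_false_iff_ne]
          rw [show p.1 = k from eq_of_beq h1]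
          exact Ne.symm hne
        simp [h1, h1', hbne2]
      · by_cases h2 : (p.1 == k') = true
        · simp [h1, h2, hbne]
        · simp [h1, h2]
  | false =>
      rw [PySem.Dict.items_insert_of_not_contains _ v' (by rw [hck']; exact hq),
          PySem.Dict.items_insert_of_contains _ v hc,
          PySem.Dict.items_insert_of_contains _ v hck,
          PySem.Dict.items_insert_of_not_contains _ v' hq,
          List.map_append]
      simp only [List.map_cons, List.map_nil]
      rw [if_neg (by simp [hbne] : ¬ ((k' == k) = true))]

-- an insert at an already-present key, absent from the pair list, commutes out of an update fold
theorem pv_update_insert_comm (k : String) (i : Int) :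
    ∀ (l : List (String × Int)) (d : PySem.Dict String Int), d.contains k = true →
      k ∉ l.map (fun x => x.1) →
      PySem.Dict.update (d.insert k i) l = (PySem.Dict.update d l).insert k i := by
  intro l
  induction l with
  | nil => intro d _ _; rfl
  | cons p t ih =>
      intro d hc hk
      simp only [List.map_cons, List.mem_cons, not_or] at hk
      have hcons : ∀ (b : PySem.Dict String Int), PySem.Dict.update b (p :: t) = PySem.Dict.update (b.insert p.1 p.2) t :=
        fun b => rfl
      rw [hcons, hcons]
      rw [pv_insert_comm d k p.1 i p.2 (fun hpk => hk.1 hpk.symm) hc]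
      apply ih
      · rw [PySem.Dict.contains_insert, hc]
        simp
      · exact hk.2

-- replacing a present key's value inside the pair list = updating then inserting
theorem pv_update_map_repl (k : String) (i : Int) :
    ∀ (l : List (String × Int)) (b : PySem.Dict String Int) (w : Int),
      (l.map (·.1)).Nodup → (k, w) ∈ l →
      PySem.Dict.update b (l.map (fun p => if p.1 == k then (k, i) else p))
        = (PySem.Dict.update b l).insert k i := by
  intro l
  induction l with
  | nil => intro b w _ hm; cases hm
  | cons p t ih =>
      intro b w hnd hm
      simp only [List.map_cons, List.nodup_cons] at hnd
      rcases List.mem_cons.mp hm with hp | ht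
      · subst hp
        have htid : t.map (fun p => if p.1 == k then (k, i) else p) = t.map id := by
          apply List.map_congr_left
          intro q hq
          have hqk : q.1 ≠ k := by
            intro hqk
            exact hnd.1 (by simpa [← hqk] using List.mem_map_of_mem (f := (·.1)) hq)
          simp [hqk]
        simp only [List.map_cons, beq_self_eq_true, if_true, htid, List.map_id]
        show PySem.Dict.update (b.insert k i) t = (PySem.Dict.update (b.insert k w) t).insert k i
        rw [← pv_update_insert_comm k i t (b.insert k w)
            (by rw [PySem.Dict.contains_insert]; simp) hnd.1,
          PySem.Dict.insert_insert_self]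
      · have hpk : p.1 ≠ k := fun hpk =>
          hnd.1 (hpk ▸ (by simpa using List.mem_map_of_mem (f := (·.1)) ht))
        simp only [List.map_cons, if_neg (by simp [hpk] : ¬ ((p.1 == k) = true))]
        show PySem.Dict.update (b.insert p.1 p.2) (t.map _) = (PySem.Dict.update (b.insert p.1 p.2) t).insert k i
        exact ih (b.insert p.1 p.2) w hnd.2 ht

-- realizing an overlay insert = inserting into the realized dict
theorem pv_update_insert (b ov : PySem.Dict String Int) (k : String) (i : Int)
    (hnd : ov.keys.Nodup) :
    PySem.Dict.update b (ov.insert k i).items = (PySem.Dict.update b ov.items).insert k i := by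
  cases hc : ov.contains k with
  | false =>
      rw [PySem.Dict.items_insert_of_not_contains ov i hc]
      rw [show PySem.Dict.update b (ov.items ++ [(k, i)])
            = List.foldl (fun d p => d.insert p.1 p.2) b (ov.items ++ [(k, i)]) from rfl]
      rw [List.foldl_append]
      rfl
  | true =>
      have hsome : (ov.get? k).isSome := by rw [← PySem.Dict.contains_eq_isSome_get?, hc]
      obtain ⟨w, hw⟩ := Option.isSome_iff_exists.mp hsome
      have hmem : (k, w) ∈ ov.items := PySem.Dict.mem_items_of_get?_eq_some ov hw
      rw [PySem.Dict.items_insert_of_contains ov i hc]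
      exact pv_update_map_repl k i ov.items b w (by simpa [PySem.Dict.keys] using hnd) hmem

-- one overlay expansion realizes to the full-dict expansion
theorem pv_stepFMO_map (base : PySem.Dict String Int) (key : String)
    (dt : PySem.Dict String Int × Int) (hnd : dt.1.keys.Nodup) :
    (pvStepFMO base key dt).map (pvReal base) = pvStepFM key (pvReal base dt) := by
  unfold pvStepFMO pvStepFM pvReal
  rw [List.map_flatMap]
  apply List.flatMap_congr
  intro i _
  dsimp only
  rw [← pv_look_eq base dt.1 key hnd]
  split_ifs with hc
  · simp only [List.map_cons, List.map_nil]
    rw [pv_update_insert base dt.1 key i hnd]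
  · rfl

-- members of an expanded frontier still have nodup keys
theorem pv_stepO_nodup (base : PySem.Dict String Int) (key : String)
    (fr : List (PySem.Dict String Int × Int)) (h : ∀ dt ∈ fr, dt.1.keys.Nodup) :
    ∀ dt' ∈ pvStepO base key fr, dt'.1.keys.Nodup := by
  intro dt' hdt'
  rw [pv_stepO_eq] at hdt'
  obtain ⟨a, ha, hdt'⟩ := List.mem_flatMap.mp hdt'
  unfold pvStepFMO at hdt'
  obtain ⟨i, _, hdt'⟩ := List.mem_flatMap.mp hdt'
  split_ifs at hdt' with hc
  · rcases List.mem_singleton.mp hdt' with rfl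
    exact PySem.Dict.nodup_keys_insert _ key i (h a ha)
  · cases hdt'

-- one frontier pass commutes with realization
theorem pv_pass (base : PySem.Dict String Int) (key : String)
    (fr : List (PySem.Dict String Int × Int)) (h : ∀ dt ∈ fr, dt.1.keys.Nodup) :
    (pvStepO base key fr).map (pvReal base) = (fr.map (pvReal base)).flatMap (pvStepFM key) := by
  rw [pv_stepO_eq, List.map_flatMap, List.flatMap_map]
  apply List.flatMap_congr
  intro dt hdt
  exact pv_stepFMO_map base key dt (h dt hdt)

-- the whole overlay BFS realizes to the full-dict BFS
theorem pv_sim (base : PySem.Dict String Int) :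
    ∀ (ks : List String) (fr : List (PySem.Dict String Int × Int)),
      (∀ dt ∈ fr, dt.1.keys.Nodup) →
      (ks.foldl (fun fr k => pvStepO base k fr) fr).map (pvReal base)
        = ks.foldl (fun fr k => fr.flatMap (pvStepFM k)) (fr.map (pvReal base)) := by
  intro ks
  induction ks with
  | nil => intro fr _; rfl
  | cons k t ih =>
      intro fr h
      rw [List.foldl_cons, List.foldl_cons, ih _ (pv_stepO_nodup base k fr h), pv_pass base k fr h]

-- the full-dict BFS followed by the final fill is the depth-first expansion
theorem pv_bfs_eq_dfs (last : String) (ks : List String)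
    (fr : List (PySem.Dict String Int × Int)) :
    ((ks.foldl (fun fr k => fr.flatMap (pvStepFM k)) fr).map (pvFin last))
      = fr.flatMap (pvDfs last ks) := by
  induction ks generalizing fr with
  | nil =>
      induction fr with
      | nil => simp
      | cons a t iht => simp [pvDfs, pvFin] at iht ⊢; exact iht
  | cons k t ih =>
      rw [List.foldl_cons, ih, List.flatMap_assoc]
      apply List.flatMap_congr
      intro dt _
      show (pvStepFM k dt).flatMap (pvDfs last t) = pvDfs last (k :: t) dt
      unfold pvStepFM pvDfs
      rw [List.flatMap_assoc]
      apply List.flatMap_congr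
      intro i _
      split_ifs with hc
      · simp
      · simp

-- every overlay in the frontier keeps nodup keys through the passes
theorem pv_frontier_nodup (base : PySem.Dict String Int) :
    ∀ (ks : List String) (fr : List (PySem.Dict String Int × Int)),
      (∀ dt ∈ fr, dt.1.keys.Nodup) →
      ∀ dt' ∈ ks.foldl (fun fr k => pvStepO base k fr) fr, dt'.1.keys.Nodup := by
  intro ks
  induction ks with
  | nil => intro fr h; simpa using h
  | cons k t ih =>
      intro fr h
      rw [List.foldl_cons]
      exact ih _ (pv_stepO_nodup base k fr h)

-- Source B's fused last pass = expand, realize, fill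
theorem pv_fused_eq (base : PySem.Dict String Int) (key last : String)
    (fr : List (PySem.Dict String Int × Int)) (h : ∀ dt ∈ fr, dt.1.keys.Nodup) :
    fr.foldl (fun out dt =>
      let rem := dt.2 - pvLook base dt.1 key
      (PySem.List.pyRange 1 100 1).foldl (fun out2 i =>
        if rem + i ≤ 100 then
          out2 ++ [(((PySem.Dict.update base dt.1.items).insert key i).insert last
                    (101 - (rem + i))).items]
        else out2) out) []
    = ((pvStepO base key fr).map (pvReal base)).map (pvFin last) := by
  have hfun : (fun (out : List (List (String × Int))) (dt : PySem.Dict String Int × Int) =>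
      let rem := dt.2 - pvLook base dt.1 key
      (PySem.List.pyRange 1 100 1).foldl (fun out2 i =>
        if rem + i ≤ 100 then
          out2 ++ [(((PySem.Dict.update base dt.1.items).insert key i).insert last
                    (101 - (rem + i))).items]
        else out2) out)
      = (fun out dt => out ++ (PySem.List.pyRange 1 100 1).flatMap (fun i =>
          if dt.2 - pvLook base dt.1 key + i ≤ 100 then
            [(((PySem.Dict.update base dt.1.items).insert key i).insert last
              (101 - (dt.2 - pvLook base dt.1 key + i))).items]
          else [])) := by
    funext out dt
    exact pv_foldl_opt (PySem.List.pyRange 1 100 1)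
      (fun i => dt.2 - pvLook base dt.1 key + i ≤ 100)
      (fun i => (((PySem.Dict.update base dt.1.items).insert key i).insert last
                  (101 - (dt.2 - pvLook base dt.1 key + i))).items) out
  rw [hfun, PySem.List.foldl_append_eq_flatMap, List.nil_append]
  rw [pv_stepO_eq, List.map_flatMap, List.map_flatMap]
  apply List.flatMap_congr
  intro dt hdt
  unfold pvStepFMO
  rw [List.map_flatMap, List.map_flatMap]
  apply List.flatMap_congr
  intro i _
  split_ifs with hc
  · simp only [List.map_cons, List.map_nil]
    unfold pvReal pvFin
    dsimp only
    rw [pv_update_insert base dt.1 key i (h dt hdt)]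
  · rfl

-- ===== VERDICT (by name: the statement is the Claim_ definition above) =====
theorem gen_recepies_spec : Claim_equal_gen_recepies := by
  intro ingridients left recepie _ hpre
  unfold Spec_gen_recepies gen_recepies gen_recepies_alt
  rw [show pvEffB = pvEff from rfl]
  by_cases h : (pvEff ingridients recepie).values.sum > 100
  · unfold pvGenBody
    simp [h]
  · simp only [if_neg h]
    have hne : left ≠ [] := by
      rcases hpre with hne | hgt
      · exact hne
      · omega
    rcases List.eq_nil_or_concat left with rfl | ⟨ks, last, rfl⟩
    · exact absurd rfl hne
    · simp only [List.concat_eq_append]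
      rw [List.getLast?_concat, List.dropLast_concat]
      dsimp only
      rcases List.eq_nil_or_concat ks with rfl | ⟨mid, key, rfl⟩
      · rw [show ([] : List String).getLast? = none from rfl]
        dsimp only
        rw [pv_body_eq_dfs ingridients last [] _ (pv_nodup_keys_eff _ _) (by omega)]
        unfold pvDfs
        rfl
      · simp only [List.concat_eq_append]
        rw [List.getLast?_concat, List.dropLast_concat]
        dsimp only
        have hnd0 : ∀ dt ∈ ([(PySem.Dict.empty, (pvEff ingridients recepie).values.sum)] :
            List (PySem.Dict String Int × Int)), dt.1.keys.Nodup := by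
          intro dt hdt
          rcases List.mem_singleton.mp hdt with rfl
          exact PySem.Dict.nodup_keys_empty
        have hndf : ∀ dt ∈ mid.foldl (fun fr k => pvStepO (pvEff ingridients recepie) k fr)
            [(PySem.Dict.empty, (pvEff ingridients recepie).values.sum)], dt.1.keys.Nodup :=
          pv_frontier_nodup _ mid _ hnd0
        rw [pv_fused_eq _ key last _ hndf, pv_pass _ key _ hndf,
          pv_sim _ mid _ hnd0]
        have hreal : (([(PySem.Dict.empty, (pvEff ingridients recepie).values.sum)] :
            List (PySem.Dict String Int × Int)).map (pvReal (pvEff ingridients recepie)))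
            = [(pvEff ingridients recepie, (pvEff ingridients recepie).values.sum)] := rfl
        rw [hreal]
        have hsplit : ((mid ++ [key]).foldl (fun fr k => fr.flatMap (pvStepFM k))
              [(pvEff ingridients recepie, (pvEff ingridients recepie).values.sum)])
            = ((mid.foldl (fun fr k => fr.flatMap (pvStepFM k))
                [(pvEff ingridients recepie, (pvEff ingridients recepie).values.sum)]).flatMap
                (pvStepFM key)) := by
          rw [List.foldl_append]
          rfl
        rw [← hsplit, pv_bfs_eq_dfs last (mid ++ [key])]
        rw [List.flatMap_cons, List.flatMap_nil, List.append_nil]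
        exact pv_body_eq_dfs ingridients last (mid ++ [key]) _ (pv_nodup_keys_eff _ _) (by omega)
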